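-- pv_equiv track=rewrite | github.com/mengyx-work/CS_algorithm_scripts | leetcode/LC_844 Backspace String Compare.py | _typeContent
-- ===== SOURCE A (Python) =====
-- def _typeContent(S):
--     ctnt = []
--     for char in S:
--         if char == '#':
--             if len(ctnt) > 0:
--                 ctnt.pop()
--         else:
--             ctnt.append(char)
--     return ctnt
-- ===== SOURCE B (Python) =====
-- def _typeContent(S):
--     skip = 0
--     res = []
--     for ch in reversed(S):
--         if ch == '#':
--             skip += 1
--         elif skip > 0:
--             skip -= 1
--         else:
--             res.append(ch)
--     res.reverse()
--     return res
-- ===== Notes on version B (the rewrite author's own statement) =====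
-- stated objective: alternative
-- what changed: Replaces A's forward simulation of a character stack (append/pop on '#') by a single right-to-left scan that maintains only an integer count of pending backspaces, collecting surviving characters and reversing once at the end.
import Mathlib
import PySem

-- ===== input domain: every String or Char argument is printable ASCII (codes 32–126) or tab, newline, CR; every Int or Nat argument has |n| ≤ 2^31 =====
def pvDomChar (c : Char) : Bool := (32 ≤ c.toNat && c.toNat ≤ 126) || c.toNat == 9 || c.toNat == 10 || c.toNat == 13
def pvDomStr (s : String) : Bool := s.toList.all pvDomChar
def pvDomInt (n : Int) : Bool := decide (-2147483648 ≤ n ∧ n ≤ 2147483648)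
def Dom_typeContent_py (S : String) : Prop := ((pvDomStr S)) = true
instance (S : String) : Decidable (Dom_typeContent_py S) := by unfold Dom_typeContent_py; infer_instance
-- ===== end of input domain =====

-- B replaces A's forward stack simulation by a right-to-left scan with a pending-backspace
-- counter (reversing the collected survivors once at the end): an alternative decomposition.


-- ===== PORT A =====
-- A: forward pass keeping the current content as a list; '#' pops the last element (if any).
def typeContent_py (S : String) : List String :=
  S.toList.foldl
    (fun ctnt char =>
      if char == '#' then
        (if ctnt.length > 0 then ctnt.dropLast else ctnt)
      else ctnt ++ [String.singleton char])
    []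

-- ===== PORT B =====
-- B helper: scan the (already reversed) character list with a pending-backspace counter,
-- collecting the surviving characters in scan order (i.e. reversed final order).
def tcRev : List Char → Nat → List String
  | [], _ => []
  | c :: rest, skip =>
    if c == '#' then tcRev rest (skip + 1)
    else if skip > 0 then tcRev rest (skip - 1)
    else String.singleton c :: tcRev rest skip

def typeContent_py_alt (S : String) : List String :=
  (tcRev S.toList.reverse 0).reverse

-- ===== PRECONDITION & SPEC =====
def Spec_typeContent_py (S : String) (out : List String) : Prop := out = typeContent_py_alt S
instance (S : String) (out : List String) : Decidable (Spec_typeContent_py S out) := by unfold Spec_typeContent_py; infer_instance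

-- ===== CLAIM (what is proved, stated in full; the proofs are below) =====
def Claim_equal_typeContent_py : Prop := ∀ (S : String), Dom_typeContent_py S → Spec_typeContent_py S (typeContent_py S)

-- ===== LEMMAS AND PROOFS =====

-- A's fold over an arbitrary character list (typeContent_py S = tcFwd S.toList by rfl).
def tcFwd (cs : List Char) : List String :=
  cs.foldl
    (fun ctnt char =>
      if char == '#' then
        (if ctnt.length > 0 then ctnt.dropLast else ctnt)
      else ctnt ++ [String.singleton char])
    []

-- Core invariant: B's reverse scan with k pending backspaces computes A's result with
-- its last k elements removed, in reverse order.
theorem tcRev_eq (cs : List Char) :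
    ∀ k, tcRev cs.reverse k = ((tcFwd cs).take ((tcFwd cs).length - k)).reverse := by
  induction cs using List.reverseRecOn with
  | nil => intro k; simp [tcRev, tcFwd]
  | append_singleton cs c ih =>
    intro k
    have hfwd : tcFwd (cs ++ [c]) =
        (if c == '#' then
          (if (tcFwd cs).length > 0 then (tcFwd cs).dropLast else tcFwd cs)
        else tcFwd cs ++ [String.singleton c]) := by
      simp [tcFwd, List.foldl_append]
    by_cases hc : c = '#'
    · subst hc
      have htake : tcFwd (cs ++ ['#']) = (tcFwd cs).take ((tcFwd cs).length - 1) := by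
        rw [hfwd]
        rcases h : tcFwd cs with _ | ⟨x, xs⟩
        · simp
        · simp [List.dropLast_eq_take]
      have : tcRev (cs ++ ['#']).reverse k = tcRev cs.reverse (k + 1) := by
        simp [tcRev]
      rw [this, ih (k + 1), htake]
      rw [List.length_take, List.take_take]
      congr 2
      omega
    · have hfwd' : tcFwd (cs ++ [c]) = tcFwd cs ++ [String.singleton c] := by
        rw [hfwd]; simp [hc]
      have hrev : (cs ++ [c]).reverse = c :: cs.reverse := by simp
      rw [hrev, hfwd']
      by_cases hk : k > 0
      · have : tcRev (c :: cs.reverse) k = tcRev cs.reverse (k - 1) := by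
          simp [tcRev, hc, hk]
        rw [this, ih (k - 1)]
        have hlen : (tcFwd cs ++ [String.singleton c]).length = (tcFwd cs).length + 1 := by simp
        rw [hlen]
        have hle : (tcFwd cs).length + 1 - k ≤ (tcFwd cs).length := by omega
        rw [List.take_append_of_le_length hle]
        congr 2
        omega
      · have hk0 : k = 0 := by omega
        subst hk0
        have : tcRev (c :: cs.reverse) 0 = String.singleton c :: tcRev cs.reverse 0 := by
          simp [tcRev, hc]
        rw [this, ih 0]
        rw [Nat.sub_zero, List.take_length,
          List.take_of_length_le (by simp), List.reverse_append]
        simp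

-- ===== VERDICT (by name: the statement is the Claim_ definition above) =====
theorem typeContent_py_spec : Claim_equal_typeContent_py := by
  intro S _
  unfold Spec_typeContent_py typeContent_py_alt
  rw [tcRev_eq S.toList 0]
  simp [tcFwd, typeContent_py]
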